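-- pv_equiv track=rewrite | github.com/yizou275/AlgoGroup_Application | find-duplicate/option1.py | valid_input
-- ===== SOURCE A (Python) =====
-- from typing import List
--
-- def valid_input(input: List[int]) -> bool:
--     '''
--     A helper method that checks the "input" list matches the pre-condition.
--     '''
--     length: int = len(input)
--
--     input_set: set = set(input)
--     if not len(input_set) == length - 1:
--         return False
--     for i in range(length - 1):
--         if i+1 not in input_set:
--             return False
--
--     return True
-- ===== SOURCE B (Python) =====
-- from typing import List
--
-- def valid_input(input: List[int]) -> bool:
--     '''
--     A helper method that checks the "input" list matches the pre-condition.
--     '''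
--     s = sorted(input)
--     if len(s) < 2:
--         return False
--     if s[0] != 1 or s[-1] != len(s) - 1:
--         return False
--     for a, b in zip(s, s[1:]):
--         if b - a not in (0, 1):
--             return False
--     return True
-- ===== Notes on version B (the rewrite author's own statement) =====
-- stated objective: alternative
-- what changed: B sorts the input once and makes a single linear scan of the sorted list (endpoints 1 and n-1, adjacent gaps at most 1), instead of A's hash-set construction with a distinct-count check and a per-value membership loop; B trades O(n) hashing for O(n log n) sorting.
import Mathlib
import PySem

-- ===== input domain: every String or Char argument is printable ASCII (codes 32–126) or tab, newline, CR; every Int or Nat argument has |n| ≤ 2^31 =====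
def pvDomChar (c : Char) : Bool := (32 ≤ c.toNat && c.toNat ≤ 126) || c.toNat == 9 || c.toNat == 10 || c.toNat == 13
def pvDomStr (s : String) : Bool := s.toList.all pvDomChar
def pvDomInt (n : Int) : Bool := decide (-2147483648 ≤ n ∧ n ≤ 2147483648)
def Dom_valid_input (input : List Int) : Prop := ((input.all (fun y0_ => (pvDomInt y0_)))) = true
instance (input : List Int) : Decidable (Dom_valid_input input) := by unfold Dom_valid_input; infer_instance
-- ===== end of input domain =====

-- B sorts the input once and scans the sorted list (endpoints 1 and n-1, adjacent gaps ≤ 1)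
-- instead of A's set construction with a distinct-count check and per-value membership loop
-- (objective: alternative algorithm, similar cost).

-- ===== PORT A =====
def valid_input (input : List Int) : Bool :=
  let length : Int := input.length
  let inputSet : PySem.Set Int := PySem.Set.ofList input
  if ¬ (PySem.Set.len inputSet == length - 1) then false
  else (PySem.List.pyRange 0 (length - 1) 1).all (fun i => PySem.Set.contains inputSet (i + 1))

-- ===== PORT B =====
def valid_input_alt (input : List Int) : Bool :=
  let s := PySem.List.sorted input (fun x => x) false
  if s.length < 2 then false
  else if !(PySem.List.pyGet? s 0 == some 1) ||
          !(PySem.List.pyGet? s (-1) == some ((s.length : Int) - 1)) then false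
  else (s.zip (PySem.List.slice s (some 1) none)).all
        (fun p => p.2 - p.1 == 0 || p.2 - p.1 == 1)

-- ===== PRECONDITION & SPEC =====
def Spec_valid_input (input : List Int) (out : Bool) : Prop := out = valid_input_alt input
instance (input : List Int) (out : Bool) : Decidable (Spec_valid_input input out) := by unfold Spec_valid_input; infer_instance

-- ===== CLAIM (what is proved, stated in full; the proofs are below) =====
def Claim_equal_valid_input : Prop := ∀ (input : List Int), Dom_valid_input input → Spec_valid_input input (valid_input input)

-- ===== LEMMAS AND PROOFS =====

-- the common characterisation: the multiset is {1,…,n-1} plus one duplicate, expressed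
-- as "n ≥ 1 and the distinct values are exactly 1..n-1"
def GoodProp (input : List Int) : Prop :=
  1 ≤ (input.length : Int) ∧ ∀ x : Int, x ∈ input ↔ 1 ≤ x ∧ x < (input.length : Int)

-- a nodup list whose members are exactly {1,…,n-1} has n-1 elements
lemma len_of_mem_iff (s : List Int) (n : Int) (hn : 1 ≤ n) (hnd : s.Nodup)
    (h : ∀ x, x ∈ s ↔ 1 ≤ x ∧ x < n) : (s.length : Int) = n - 1 := by
  have hT : s.toFinset = Finset.Ico (1 : Int) n := by
    ext x; simp [h x]
  have hcard : s.toFinset.card = s.length := List.toFinset_card_of_nodup hnd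
  have hico : (Finset.Ico (1 : Int) n).card = (n - 1).toNat := by
    simp [Int.card_Ico]
  have : s.length = (n - 1).toNat := by rw [← hcard, hT, hico]
  omega

-- ===== A-side characterisation =====
lemma A_iff (input : List Int) : valid_input input = true ↔ GoodProp input := by
  set n : Int := (input.length : Int) with hn
  set s : PySem.Set Int := PySem.Set.ofList input with hs
  have hnd : s.Nodup := PySem.Set.nodup_ofList input
  have hmemS : ∀ x : Int, x ∈ s ↔ x ∈ input := fun x => PySem.Set.mem_ofList input x
  by_cases hlen : ((s.length : Int) = n - 1)
  · have hn1 : 1 ≤ n := by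
      have : (0 : Int) ≤ (s.length : Int) := by positivity
      omega
    simp only [valid_input, ← hn, ← hs, PySem.Set.len, beq_iff_eq, hlen, not_true, if_false,
      List.all_eq_true, GoodProp]
    constructor
    · intro h
      refine ⟨hn1, ?_⟩
      have hcov : ∀ y : Int, 1 ≤ y → y < n → y ∈ s := by
        intro y h1 h2
        have := h (y - 1) (by rw [PySem.List.mem_pyRange_one]; omega)
        simpa [PySem.Set.contains] using this
      have hT : Finset.Ico (1 : Int) n ⊆ s.toFinset := by
        intro y hy
        rw [Finset.mem_Ico] at hy
        exact List.mem_toFinset.mpr (hcov y hy.1 hy.2)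
      have hcard : s.toFinset.card = s.length := List.toFinset_card_of_nodup hnd
      have hico : (Finset.Ico (1 : Int) n).card = (n - 1).toNat := by simp [Int.card_Ico]
      have hEq : Finset.Ico (1 : Int) n = s.toFinset := by
        apply Finset.eq_of_subset_of_card_le hT
        rw [hcard, hico]; omega
      intro z
      rw [← hmemS z, ← List.mem_toFinset, ← hEq, Finset.mem_Ico]
    · rintro ⟨-, h⟩
      intro i hi
      rw [PySem.List.mem_pyRange_one] at hi
      have : i + 1 ∈ s := by rw [hmemS, h]; omega
      simpa [PySem.Set.contains] using this
  · have hA : valid_input input = false := by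
      simp only [valid_input, ← hn, ← hs, PySem.Set.len, beq_iff_eq]
      rw [if_pos (by exact_mod_cast hlen)]
    rw [hA]
    refine iff_of_false (by simp) ?_
    rintro ⟨hn1, h⟩
    exact hlen (len_of_mem_iff s n hn1 hnd (by intro x; rw [hmemS, h]))

-- ===== sorted-scan machinery for B =====

-- every member of a (≤)-pairwise list is ≤ its last element
lemma le_getLast_of_pairwise : ∀ (l : List Int), l.Pairwise (· ≤ ·) →
    ∀ x ∈ l, ∀ (hne : l ≠ []), x ≤ l.getLast hne
  | [], _, x, hx, hne => absurd rfl hne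
  | a :: t, hp, x, hx, hne => by
    rcases t with _ | ⟨b, t'⟩
    · simp_all
    · rw [List.getLast_cons (by simp)]
      rcases List.mem_cons.mp hx with rfl | hxt
      · have hb : (b :: t').getLast (by simp) ∈ b :: t' := List.getLast_mem _
        exact le_trans ((List.pairwise_cons.mp hp).1 _ hb)
          (le_refl _)
      · exact le_getLast_of_pairwise (b :: t') (List.pairwise_cons.mp hp).2 x hxt (by simp)

-- the all-over-zip-with-tail loop is a Chain'
lemma all_zip_tail_iff (p : Int × Int → Bool) : ∀ (s : List Int),
    ((s.zip s.tail).all p = true) ↔ List.IsChain (fun a b => p (a, b) = true) s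
  | [] => by simp
  | [a] => by simp [List.IsChain.singleton a]
  | a :: b :: t => by
    have ih := all_zip_tail_iff p (b :: t)
    rw [List.isChain_cons_cons, ← ih]
    simp [List.zip_cons_cons]

-- gap-freeness: a chain with steps ≤ 1 covers every value between head and last
lemma chain_cover : ∀ (a : Int) (t : List Int),
    List.IsChain (fun x y => y ≤ x + 1) (a :: t) →
    ∀ y : Int, a ≤ y → y ≤ (a :: t).getLast (by simp) → y ∈ a :: t
  | a, [], _, y, h1, h2 => by
    simp only [List.getLast_singleton] at h2
    simp [le_antisymm h2 h1]
  | a, b :: t', hc, y, h1, h2 => by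
    rcases List.isChain_cons_cons.mp hc with ⟨hab, hc'⟩
    by_cases hy : y ≤ a
    · simp [le_antisymm hy h1]
    · have : b ≤ y := by omega
      rw [List.getLast_cons (by simp)] at h2
      exact List.mem_cons_of_mem a (chain_cover b t' hc' y this h2)

-- a sorted list whose member-set is order-dense has adjacent gaps ≤ 1
lemma chain_of_dense : ∀ (s : List Int), s.Pairwise (· ≤ ·) →
    (∀ c : Int, (∃ x ∈ s, x < c) → (∃ x ∈ s, c < x) → c ∈ s) →
    List.IsChain (fun x y => x ≤ y ∧ y ≤ x + 1) s
  | [] => fun _ _ => List.IsChain.nil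
  | [a] => fun _ _ => List.IsChain.singleton a
  | a :: b :: t => fun hp hd => by
    rcases List.pairwise_cons.mp hp with ⟨ha, hp'⟩
    have hab : a ≤ b := ha b (by simp)
    refine List.isChain_cons_cons.mpr ⟨⟨hab, ?_⟩, ?_⟩
    · by_contra hgap
      have h1 : a < a + 1 := by omega
      have h2 : a + 1 < b := by omega
      have hmem : a + 1 ∈ a :: b :: t :=
        hd (a + 1) ⟨a, by simp, h1⟩ ⟨b, by simp, h2⟩
      rcases List.mem_cons.mp hmem with h | h
      · omega
      · rcases List.mem_cons.mp h with h' | h'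
        · omega
        · have := (List.pairwise_cons.mp hp').1 _ h'; omega
    · refine chain_of_dense (b :: t) hp' ?_
      intro c ⟨x, hx, hxc⟩ ⟨z, hz, hcz⟩
      have hmem : c ∈ a :: b :: t :=
        hd c ⟨x, List.mem_cons_of_mem a hx, hxc⟩ ⟨z, List.mem_cons_of_mem a hz, hcz⟩
      rcases List.mem_cons.mp hmem with rfl | h
      · have := ha x hx; omega
      · exact h

-- ===== B-side characterisation =====
lemma B_iff (input : List Int) : valid_input_alt input = true ↔ GoodProp input := by
  set n : Int := (input.length : Int) with hn
  have hperm : (PySem.List.sorted input (fun x => x) false).Perm input :=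
    PySem.List.sorted_perm input (fun x => x) false
  have hpw : (PySem.List.sorted input (fun x => x) false).Pairwise (· ≤ ·) := by
    simpa using PySem.List.sorted_pairwise input (fun x => x)
  have hmem : ∀ x : Int, x ∈ PySem.List.sorted input (fun x => x) false ↔ x ∈ input :=
    fun x => hperm.mem_iff
  have hlen : (PySem.List.sorted input (fun x => x) false).length = input.length :=
    hperm.length_eq
  by_cases hsmall : (PySem.List.sorted input (fun x => x) false).length < 2
  · have hB : valid_input_alt input = false := by
      simp only [valid_input_alt]
      rw [if_pos hsmall]
    rw [hB]
    refine iff_of_false (by simp) ?_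
    rintro ⟨hn1, h⟩
    have h1 : input.length = 1 := by omega
    rcases input with _ | ⟨x, xs⟩
    · simp at h1
    · have : xs = [] := by simpa using h1
      subst this
      have hx := (h x).mp (by simp)
      simp only [List.length_cons, List.length_nil] at hx
      omega
  · -- the sorted list has at least two elements
    rcases hse : PySem.List.sorted input (fun x => x) false with _ | ⟨a, t⟩
    · rw [hse] at hsmall; simp at hsmall
    · rw [hse] at hperm hpw hmem hlen hsmall
      have hlast : (a :: t).getLast? = some ((a :: t).getLast (by simp)) :=
        List.getLast?_eq_some_getLast (by simp)
      set L : Int := (a :: t).getLast (by simp) with hL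
      have hn2 : 2 ≤ n := by
        have : 2 ≤ (a :: t).length := by omega
        rw [hn, ← hlen]
        exact_mod_cast this
      have haL : ∀ x ∈ a :: t, a ≤ x ∧ x ≤ L := by
        intro x hx
        refine ⟨?_, le_getLast_of_pairwise _ hpw _ hx (by simp)⟩
        rcases List.mem_cons.mp hx with rfl | hxt
        · exact le_refl x
        · exact (List.pairwise_cons.mp hpw).1 x hxt
      have hB : valid_input_alt input =
          (if ¬(a = 1 ∧ L = n - 1) then false
           else ((a :: t).zip t).all (fun p => p.2 - p.1 == 0 || p.2 - p.1 == 1)) := by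
        simp only [valid_input_alt, hse]
        rw [if_neg hsmall]
        rw [PySem.List.pyGet?_neg_one, hlast]
        simp only [PySem.List.pyGet?_zero_cons, PySem.List.slice_from_one, List.tail_cons, hlen,
          ← hn]
        by_cases hok : a = 1 ∧ L = n - 1
        · rw [if_neg (by simp [hok.1, hok.2]), if_neg (by simp [hok])]
        · rw [if_pos hok]
          have hc : (!(some a == some (1 : Int)) || !(some L == some (n - 1))) = true := by
            rcases not_and_or.mp hok with h | h <;> simp [h]
          rw [hc]
          simp
      rw [hB]
      by_cases hok : a = 1 ∧ L = n - 1
      · rw [if_neg (by simp [hok])]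
        have hzip : ((a :: t).zip t).all (fun p => p.2 - p.1 == 0 || p.2 - p.1 == 1) = true ↔
            List.IsChain (fun x y => x ≤ y ∧ y ≤ x + 1) (a :: t) := by
          have hz := all_zip_tail_iff (fun p => p.2 - p.1 == 0 || p.2 - p.1 == 1) (a :: t)
          simp only [List.tail_cons] at hz
          rw [hz]
          constructor
          · refine fun h => h.imp (fun x y hp => ?_)
            simp only [Bool.or_eq_true, beq_iff_eq] at hp; omega
          · refine fun h => h.imp (fun x y hp => ?_)
            simp only [Bool.or_eq_true, beq_iff_eq]; omega
        rw [hzip]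
        simp only [GoodProp, ← hn]
        constructor
        · intro hch
          refine ⟨by omega, ?_⟩
          intro x
          rw [← hmem x]
          constructor
          · intro hx
            have := haL x hx
            omega
          · intro hx
            have hch' : List.IsChain (fun x y => y ≤ x + 1) (a :: t) :=
              hch.imp (fun x y hp => hp.2)
            exact chain_cover a t hch' x (by omega) (by rw [← hL]; omega)
        · rintro ⟨-, h⟩
          apply chain_of_dense (a :: t) hpw
          rintro c ⟨x, hx, hxc⟩ ⟨z, hz, hcz⟩
          have hxm : 1 ≤ x ∧ x < n := (h x).mp ((hmem x).mp hx)
          have hzm : 1 ≤ z ∧ z < n := (h z).mp ((hmem z).mp hz)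
          rw [hmem, h]
          omega
      · rw [if_pos (by simp [hok])]
        refine iff_of_false (by simp) ?_
        rintro ⟨hn1, h⟩
        apply hok
        have hain : a ∈ input := (hmem a).mp (by simp)
        have ham := (h a).mp hain
        have h1in : (1 : Int) ∈ a :: t := (hmem 1).mpr ((h 1).mpr (by omega))
        have hnin : (n - 1) ∈ a :: t := (hmem (n - 1)).mpr ((h (n - 1)).mpr (by omega))
        have hamin : a ≤ 1 := (haL 1 h1in).1
        have hLin : L ∈ a :: t := by rw [hL]; exact List.getLast_mem (by simp)
        have hLm := (h L).mp ((hmem L).mp hLin)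
        have hLmax : n - 1 ≤ L := (haL (n - 1) hnin).2
        exact ⟨by omega, by omega⟩

-- ===== VERDICT (by name: the statement is the Claim_ definition above) =====
theorem valid_input_spec : Claim_equal_valid_input := by
  intro input _
  unfold Spec_valid_input
  rw [Bool.eq_iff_iff, A_iff, B_iff]
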